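-- pv_equiv track=rewrite | github.com/apertif/apercal | apercal/subs/readmirhead.py | fixra
-- ===== SOURCE A (Python) =====
-- def fixra(ra0):
--     """
--     fixra: module to fix the notation of the ra string
--     ra0: input ra notation from a skycoords query
--     returns: the fixed notation for the ra
--     """
--     R = ''
--     s = 0
--     for i in ra0:
--         if i == ':':
--             if s == 0:
--                 R += 'h'
--                 s += 1
--             else:
--                 R += 'm'
--         else:
--             R += i
--     return R
-- ===== SOURCE B (Python) =====
-- def fixra(ra0):
--     """
--     fixra: module to fix the notation of the ra string
--     ra0: input ra notation from a skycoords query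
--     returns: the fixed notation for the ra
--     """
--     return ra0.replace(':', 'h', 1).replace(':', 'm')
-- ===== Notes on version B (the rewrite author's own statement) =====
-- stated objective: idiomatic
-- what changed: Replaces the explicit per-character loop with a state flag by two str.replace calls: the first colon becomes 'h' via count=1, every remaining colon becomes 'm'; the C-implemented str.replace gives a measured constant-factor speedup.
import Mathlib
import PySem

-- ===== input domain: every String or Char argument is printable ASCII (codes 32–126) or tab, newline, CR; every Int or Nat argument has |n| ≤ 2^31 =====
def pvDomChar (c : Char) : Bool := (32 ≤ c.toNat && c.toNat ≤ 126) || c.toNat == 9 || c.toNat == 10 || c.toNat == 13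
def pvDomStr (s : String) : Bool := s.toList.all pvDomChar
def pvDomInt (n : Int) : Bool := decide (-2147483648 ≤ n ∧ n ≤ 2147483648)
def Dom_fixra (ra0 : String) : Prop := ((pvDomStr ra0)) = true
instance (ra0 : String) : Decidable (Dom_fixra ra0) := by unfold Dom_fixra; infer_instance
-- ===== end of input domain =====

-- B replaces A's explicit character loop with a state flag by two str.replace calls (idiomatic, same cost).

-- ===== PORT A =====
-- literal port of A's loop: accumulator R (list of chars) and flag s, one step per character
def fixra (ra0 : String) : String :=
  let st := ra0.toList.foldl
    (fun (acc : List Char × Int) i =>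
      if i = ':' then
        if acc.2 = 0 then (acc.1 ++ ['h'], acc.2 + 1)
        else (acc.1 ++ ['m'], acc.2)
      else (acc.1 ++ [i], acc.2))
    ([], 0)
  String.ofList st.1

-- ===== PORT B =====
-- hand port of ra0.replace(':', 'h', 1) — exact for a single-character pattern:
-- copy until the first ':', replace it by 'h', keep the rest unchanged
def replaceFirstColonH : List Char → List Char
  | [] => []
  | c :: t => if c = ':' then 'h' :: t else c :: replaceFirstColonH t

def fixra_alt (ra0 : String) : String :=
  PySem.Str.replace (String.ofList (replaceFirstColonH ra0.toList)) ":" "m"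

-- ===== PRECONDITION & SPEC =====
def Spec_fixra (ra0 : String) (out : String) : Prop := out = fixra_alt ra0
instance (ra0 : String) (out : String) : Decidable (Spec_fixra ra0 out) := by unfold Spec_fixra; infer_instance

-- ===== CLAIM (what is proved, stated in full; the proofs are below) =====
def Claim_equal_fixra : Prop := ∀ (ra0 : String), Dom_fixra ra0 → Spec_fixra ra0 (fixra ra0)

-- ===== LEMMAS AND PROOFS =====

def colonToM (c : Char) : Char := if c = ':' then 'm' else c

theorem replace_go_colon (l : List Char) : ∀ (fuel : Nat) (acc : List Char),
    l.length ≤ fuel →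
    PySem.Chars.replace.go [':'] ['m'] fuel l acc = acc.reverse ++ l.map colonToM := by
  induction l with
  | nil =>
    intro fuel acc _
    cases fuel <;> simp [PySem.Chars.replace.go]
  | cons c t ih =>
    intro fuel acc hf
    cases fuel with
    | zero => simp at hf
    | succ n =>
      simp only [List.length_cons, Nat.succ_le_succ_iff] at hf
      by_cases hc : c = ':'
      · subst hc
        simp only [PySem.Chars.replace.go, List.isPrefixOf]
        simp [ih n _ hf, colonToM]
      · have hp : [':'].isPrefixOf (c :: t) = false := by
          have h1 : (':' == c) = false := beq_eq_false_iff_ne.mpr (fun h => hc h.symm)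
          show ((':' == c) && List.isPrefixOf ([] : List Char) t) = false
          simp [h1]
        simp only [PySem.Chars.replace.go, hp]
        simp [ih n _ hf, colonToM, hc]

theorem replace_colon_eq_map (l : List Char) :
    PySem.Chars.replace l [':'] ['m'] = l.map colonToM := by
  rw [PySem.Chars.replace]
  simp [replace_go_colon l l.length [] le_rfl]

-- A's loop once the flag is set: every remaining colon maps to 'm'
theorem foldA_flag_set (l : List Char) : ∀ (R : List Char) (s : Int), s ≠ 0 →
    (l.foldl (fun (acc : List Char × Int) i =>
      if i = ':' then
        if acc.2 = 0 then (acc.1 ++ ['h'], acc.2 + 1)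
        else (acc.1 ++ ['m'], acc.2)
      else (acc.1 ++ [i], acc.2)) (R, s)).1 = R ++ l.map colonToM := by
  induction l with
  | nil => intro R s _; simp
  | cons c t ih =>
    intro R s hs
    by_cases hc : c = ':'
    · subst hc; simp [List.foldl, hs, ih _ s hs, colonToM]
    · simp [List.foldl, hc, ih _ s hs, colonToM]

-- A's loop from flag 0 computes replace-first-colon then map-later-colons
theorem foldA_flag_zero (l : List Char) : ∀ (R : List Char),
    (l.foldl (fun (acc : List Char × Int) i =>
      if i = ':' then
        if acc.2 = 0 then (acc.1 ++ ['h'], acc.2 + 1)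
        else (acc.1 ++ ['m'], acc.2)
      else (acc.1 ++ [i], acc.2)) (R, 0)).1 = R ++ (replaceFirstColonH l).map colonToM := by
  induction l with
  | nil => intro R; simp [replaceFirstColonH]
  | cons c t ih =>
    intro R
    by_cases hc : c = ':'
    · subst hc
      simp only [List.foldl, reduceIte]
      rw [foldA_flag_set t _ (0 + 1) (by norm_num)]
      simp [replaceFirstColonH, colonToM]
    · simp [List.foldl, hc, ih, replaceFirstColonH, colonToM]

-- ===== VERDICT (by name: the statement is the Claim_ definition above) =====
theorem fixra_spec : Claim_equal_fixra := by
  intro ra0 _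
  unfold Spec_fixra fixra fixra_alt
  simp only [PySem.Str.replace]
  rw [foldA_flag_zero ra0.toList []]
  simp [replace_colon_eq_map, String.toList_ofList]
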